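-- pv_equiv track=rewrite | github.com/pypi-data/pypi-mirror-96 | packages/lilies/lilies-0.3.2-py3-none-any.whl/lilies/objects/lilyblock.py | _vstrip_by_iter
-- ===== SOURCE A (Python) =====
-- def _vstrip_by_iter(iter, chars):
--     strip_complete = False
--     for row in iter:
--         if strip_complete:
--             yield row
--             continue
--         stripped = row.strip(chars)
--         if len(stripped) != 0:
--             strip_complete = True
--             yield row
-- ===== SOURCE B (Python) =====
-- def _vstrip_by_iter(iter, chars):
--     # Two-phase: materialize the rows, locate the first non-blank index, slice.
--     rows = list(iter)
--     start = len(rows)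
--     for k in range(len(rows)):
--         if len(rows[k].strip(chars)) != 0:
--             start = k
--             break
--     yield from rows[start:]
-- ===== Notes on version B (the rewrite author's own statement) =====
-- stated objective: alternative
-- what changed: Replaces the stateful strip_complete flag loop that decides row-by-row whether to emit with a two-phase algorithm: materialize the rows, compute the index of the first row that does not strip to empty, and emit the slice from that index.
import Mathlib
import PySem

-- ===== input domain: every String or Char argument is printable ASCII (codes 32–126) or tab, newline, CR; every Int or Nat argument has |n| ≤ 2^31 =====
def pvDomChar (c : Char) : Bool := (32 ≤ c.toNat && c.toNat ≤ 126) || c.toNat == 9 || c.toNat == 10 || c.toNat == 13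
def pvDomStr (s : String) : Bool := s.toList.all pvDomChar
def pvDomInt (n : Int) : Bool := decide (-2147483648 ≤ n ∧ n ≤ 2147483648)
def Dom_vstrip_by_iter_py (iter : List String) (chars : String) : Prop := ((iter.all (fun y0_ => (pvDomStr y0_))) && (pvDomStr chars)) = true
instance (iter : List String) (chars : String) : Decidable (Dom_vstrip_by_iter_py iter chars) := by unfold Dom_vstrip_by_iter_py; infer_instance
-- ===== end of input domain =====

-- B replaces A's stateful flag loop with a two-phase algorithm (find first non-blank index, then slice); same cost, alternative structure.


-- ===== PORT A =====
-- faithful fold port of A's loop: state = (strip_complete, rows yielded so far)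
def vstrip_by_iter_py (iter : List String) (chars : String) : List String :=
  (iter.foldl
    (fun (st : Bool × List String) row =>
      if st.1 then (st.1, st.2 ++ [row])
      else
        let stripped := PySem.Str.stripChars row chars
        if PySem.Str.len stripped ≠ 0 then (true, st.2 ++ [row])
        else st)
    (false, [])).2

-- ===== PORT B =====
-- Source B's first phase: the index-scan loop with break; returns rows.length when no row is non-blank
def vstrip_findStart (chars : String) : List String → Nat
  | [] => 0
  | r :: t =>
    if PySem.Str.len (PySem.Str.stripChars r chars) ≠ 0 then 0
    else vstrip_findStart chars t + 1

-- Source B's second phase: rows[start:] with 0 ≤ start ≤ len(rows), where the slice is exactly List.drop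
def vstrip_by_iter_py_alt (iter : List String) (chars : String) : List String :=
  iter.drop (vstrip_findStart chars iter)

-- ===== PRECONDITION & SPEC =====
def Spec_vstrip_by_iter_py (iter : List String) (chars : String) (out : List String) : Prop := out = vstrip_by_iter_py_alt iter chars
instance (iter : List String) (chars : String) (out : List String) : Decidable (Spec_vstrip_by_iter_py iter chars out) := by unfold Spec_vstrip_by_iter_py; infer_instance

-- ===== CLAIM (what is proved, stated in full; the proofs are below) =====
def Claim_equal_vstrip_by_iter_py : Prop := ∀ (iter : List String) (chars : String), Dom_vstrip_by_iter_py iter chars → Spec_vstrip_by_iter_py iter chars (vstrip_by_iter_py iter chars)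

-- ===== LEMMAS AND PROOFS =====
-- once the flag is true, A's fold appends every remaining row
lemma vstrip_flag_true (chars : String) (l : List String) (acc : List String) :
    (l.foldl
      (fun (st : Bool × List String) row =>
        if st.1 then (st.1, st.2 ++ [row])
        else
          let stripped := PySem.Str.stripChars row chars
          if PySem.Str.len stripped ≠ 0 then (true, st.2 ++ [row])
          else st)
      (true, acc)) = (true, acc ++ l) := by
  induction l generalizing acc with
  | nil => simp
  | cons h t ih => simpa using ih (acc ++ [h])

lemma vstrip_eq_alt (iter : List String) (chars : String) :
    vstrip_by_iter_py iter chars = vstrip_by_iter_py_alt iter chars := by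
  induction iter with
  | nil => rfl
  | cons h t ih =>
    by_cases hb : PySem.Chars.stripChars h.toList chars.toList = []
    · have hl : PySem.Str.len (PySem.Str.stripChars h chars) = 0 := by
        simp [PySem.Str.len_eq, PySem.Str.toList_stripChars, hb]
      simpa [vstrip_by_iter_py, vstrip_by_iter_py_alt, vstrip_findStart, hl, hb] using ih
    · have hl : PySem.Str.len (PySem.Str.stripChars h chars) ≠ 0 := by
        simp [PySem.Str.len_eq, PySem.Str.toList_stripChars]
        simpa [Int.natCast_eq_zero, List.length_eq_zero_iff] using hb
      have hflag := vstrip_flag_true chars t [h]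
      simp [vstrip_by_iter_py, vstrip_by_iter_py_alt, vstrip_findStart, hl, hb] at hflag ⊢
      simpa using congrArg Prod.snd hflag

-- ===== VERDICT (by name: the statement is the Claim_ definition above) =====
theorem vstrip_by_iter_py_spec : Claim_equal_vstrip_by_iter_py := by
  intro iter chars _
  unfold Spec_vstrip_by_iter_py
  exact vstrip_eq_alt iter chars
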